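-- pv_equiv track=rewrite | github.com/FaridWaid/sms2-praktikum-strukturdata | Modul 1/modul101.py | primaganjil
-- ===== SOURCE A (Python) =====
-- def primaganjil (a):
--     prima=[]
--     ganjil=[]
--     for i in range (1,a,2):
--         if i == 1:
--             ganjil.append(i)
--         else:
--             for j in range (2,i):
--                 if i %j == 0:
--                     ganjil.append(i)
--                     break
--             else:
--                 prima.append(i)
--     return prima, ganjil
-- ===== SOURCE B (Python) =====
-- def _isprime_odd(i):
--     d = 3
--     while d * d <= i:
--         if i % d == 0:
--             return False
--         d += 2
--     return True
--
-- def primaganjil(a):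
--     odds = range(1, a, 2)
--     prima = [i for i in odds if i != 1 and _isprime_odd(i)]
--     ganjil = [i for i in odds if i == 1 or not _isprime_odd(i)]
--     return prima, ganjil
-- ===== Notes on version B (the rewrite author's own statement) =====
-- stated objective: faster
-- what changed: B replaces A's single accumulating loop with a full trial division over range(2,i) by two filter comprehensions over the odd range using an odd-divisor trial division up to sqrt(i).
import Mathlib
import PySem

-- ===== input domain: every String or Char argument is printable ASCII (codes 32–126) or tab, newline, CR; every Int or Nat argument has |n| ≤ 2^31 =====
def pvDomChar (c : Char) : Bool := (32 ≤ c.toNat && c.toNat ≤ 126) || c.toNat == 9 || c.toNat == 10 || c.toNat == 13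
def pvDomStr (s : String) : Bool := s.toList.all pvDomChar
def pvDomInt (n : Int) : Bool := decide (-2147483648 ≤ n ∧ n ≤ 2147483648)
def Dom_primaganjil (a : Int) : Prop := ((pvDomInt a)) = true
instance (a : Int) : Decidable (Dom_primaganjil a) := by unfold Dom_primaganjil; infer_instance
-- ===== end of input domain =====

-- B splits the odd range with a sqrt-bounded odd-divisor primality test (two filters)
-- instead of A's full trial division over range(2,i) inside one accumulating loop; objective: faster.

-- ===== PORT A =====
-- inner 'for j in range(2,i): if i % j == 0: … break / else:' — true iff some j divides i
def pvAScan (i : Int) (js : List Int) : Bool :=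
  match js with
  | [] => false
  | j :: rest => if PySem.Int.mod i j = 0 then true else pvAScan i rest

def primaganjil (a : Int) : List Int × List Int :=
  (PySem.List.pyRange 1 a 2).foldl
    (fun s i =>
      if i = 1 then (s.1, s.2 ++ [i])
      else if pvAScan i (PySem.List.pyRange 2 i 1) then (s.1, s.2 ++ [i])
      else (s.1 ++ [i], s.2))
    ([], [])

-- ===== PORT B =====
-- 'while d * d <= i: if i % d == 0: return False; d += 2; return True'
def pvIsPrimeOdd (i d : Int) : Bool :=
  if h : d * d ≤ i then
    if PySem.Int.mod i d = 0 then false else pvIsPrimeOdd i (d + 2)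
  else true
termination_by (i + 2 - d).toNat
decreasing_by
  have hdi : d ≤ i := by
    rcases (show d ≤ 0 ∨ 1 ≤ d by omega) with h0 | h0
    · nlinarith [mul_self_nonneg d]
    · nlinarith
  omega

def primaganjil_alt (a : Int) : List Int × List Int :=
  let odds := PySem.List.pyRange 1 a 2
  (odds.filter (fun i => !(i == 1) && pvIsPrimeOdd i 3),
   odds.filter (fun i => (i == 1) || !(pvIsPrimeOdd i 3)))

-- ===== PRECONDITION & SPEC =====
def Spec_primaganjil (a : Int) (out : List Int × List Int) : Prop := out = primaganjil_alt a
instance (a : Int) (out : List Int × List Int) : Decidable (Spec_primaganjil a out) := by unfold Spec_primaganjil; infer_instance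

-- ===== CLAIM (what is proved, stated in full; the proofs are below) =====
def Claim_equal_primaganjil : Prop := ∀ (a : Int), Dom_primaganjil a → Spec_primaganjil a (primaganjil a)

-- ===== LEMMAS AND PROOFS =====

-- A's foldl is a pair of filters
lemma pvFoldA (l : List Int) (s : List Int × List Int) :
    l.foldl
      (fun s i =>
        if i = 1 then (s.1, s.2 ++ [i])
        else if pvAScan i (PySem.List.pyRange 2 i 1) then (s.1, s.2 ++ [i])
        else (s.1 ++ [i], s.2)) s
    = (s.1 ++ l.filter (fun i => !(i == 1) && !(pvAScan i (PySem.List.pyRange 2 i 1))),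
       s.2 ++ l.filter (fun i => (i == 1) || pvAScan i (PySem.List.pyRange 2 i 1))) := by
  induction l generalizing s with
  | nil => simp
  | cons x xs ih =>
    simp only [List.foldl_cons, List.filter_cons]
    by_cases hx : x = 1
    · simp [hx, ih]
    · by_cases hs : pvAScan x (PySem.List.pyRange 2 x 1)
      · simp [hx, hs, ih]
      · simp [hx, hs, ih]

lemma pvAScan_iff (i : Int) (l : List Int) : pvAScan i l = true ↔ ∃ j ∈ l, j ∣ i := by
  induction l with
  | nil => simp [pvAScan]
  | cons x xs ih =>
    simp only [pvAScan]
    split_ifs with h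
    · simp only [true_iff]
      exact ⟨x, List.mem_cons_self .., (PySem.Int.mod_eq_zero_iff_dvd i x).1 h⟩
    · rw [ih]
      constructor
      · rintro ⟨j, hj, hd⟩; exact ⟨j, List.mem_cons_of_mem _ hj, hd⟩
      · rintro ⟨j, hj, hd⟩
        rcases List.mem_cons.1 hj with rfl | hj'
        · exact absurd ((PySem.Int.mod_eq_zero_iff_dvd i j).2 hd) h
        · exact ⟨j, hj', hd⟩

lemma pvIsPrimeOdd_false_iff (i d : Int) :
    1 ≤ d → (pvIsPrimeOdd i d = false ↔ ∃ e, d ≤ e ∧ 2 ∣ e - d ∧ e * e ≤ i ∧ e ∣ i) := by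
  induction d using pvIsPrimeOdd.induct i with
  | case1 d hle hmod =>
    intro _
    rw [pvIsPrimeOdd]
    simp only [dif_pos hle, if_pos hmod]
    exact iff_of_true trivial
      ⟨d, le_refl d, ⟨0, by ring⟩, hle, (PySem.Int.mod_eq_zero_iff_dvd i d).1 hmod⟩
  | case2 d hle hmod ih =>
    intro hd
    rw [pvIsPrimeOdd]
    simp only [dif_pos hle, if_neg hmod]
    rw [ih (by omega)]
    constructor
    · rintro ⟨e, he, hpar, hee, hdvd⟩
      exact ⟨e, by omega, by omega, hee, hdvd⟩
    · rintro ⟨e, he, hpar, hee, hdvd⟩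
      have hne : e ≠ d := by
        rintro rfl
        exact hmod ((PySem.Int.mod_eq_zero_iff_dvd i e).2 hdvd)
      exact ⟨e, by omega, by omega, hee, hdvd⟩
  | case3 d hgt =>
    intro hd
    rw [pvIsPrimeOdd]
    simp only [dif_neg hgt]
    refine iff_of_false (by simp) ?_
    rintro ⟨e, he, -, hee, -⟩
    exact hgt (le_trans (mul_le_mul he he (by omega) (by omega)) hee)

-- the mathematical bridge: an odd i ≥ 3 has a proper divisor ≥ 2 iff it has an odd divisor e ≥ 3 with e² ≤ i
lemma pvDivisor_bridge (i : Int) (h3 : 3 ≤ i) (hodd : (2:Int) ∣ i - 1) :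
    (∃ j, 2 ≤ j ∧ j < i ∧ j ∣ i) ↔ (∃ e, 3 ≤ e ∧ 2 ∣ e - 3 ∧ e * e ≤ i ∧ e ∣ i) := by
  have hiodd : ¬ (2:Int) ∣ i := by omega
  constructor
  · rintro ⟨j, h2, hlt, k, hk⟩
    have hjdvd : j ∣ i := ⟨k, hk⟩
    have hkdvd : k ∣ i := ⟨j, by rw [hk]; ring⟩
    have hjodd : ¬ (2:Int) ∣ j := fun h => hiodd (h.trans hjdvd)
    have hkpos : 1 ≤ k := by nlinarith
    have hkne1 : k ≠ 1 := by rintro rfl; omega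
    have hkodd : ¬ (2:Int) ∣ k := fun h => hiodd (h.trans hkdvd)
    have hj3 : 3 ≤ j := by omega
    have hk3 : 3 ≤ k := by omega
    rcases le_total j k with hjk | hjk
    · exact ⟨j, hj3, by omega, by nlinarith, hjdvd⟩
    · exact ⟨k, hk3, by omega, by nlinarith, hkdvd⟩
  · rintro ⟨e, h3e, -, hee, hdvd⟩
    exact ⟨e, by omega, by nlinarith, hdvd⟩

lemma pvScan_eq (i : Int) (h1 : 1 ≤ i) (hodd : (2:Int) ∣ i - 1) (hne : i ≠ 1) :
    pvAScan i (PySem.List.pyRange 2 i 1) = !pvIsPrimeOdd i 3 := by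
  have h3 : 3 ≤ i := by omega
  have hA : pvAScan i (PySem.List.pyRange 2 i 1) = true ↔ ∃ j, 2 ≤ j ∧ j < i ∧ j ∣ i := by
    rw [pvAScan_iff]
    constructor
    · rintro ⟨j, hj, hd⟩
      rw [PySem.List.mem_pyRange_one] at hj
      exact ⟨j, hj.1, hj.2, hd⟩
    · rintro ⟨j, hj2, hjlt, hd⟩
      exact ⟨j, PySem.List.mem_pyRange_one.2 ⟨hj2, hjlt⟩, hd⟩
  have hB := pvIsPrimeOdd_false_iff i 3 (by omega)
  have key := pvDivisor_bridge i h3 hodd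
  cases hb : pvIsPrimeOdd i 3
  · simp only [Bool.not_false]
    exact hA.2 (key.2 (hB.1 hb))
  · simp only [Bool.not_true]
    rw [← Bool.not_eq_true]
    intro hscan
    have hfalse := hB.2 (key.1 (hA.1 hscan))
    rw [hb] at hfalse
    exact absurd hfalse (by simp)

-- ===== VERDICT (by name: the statement is the Claim_ definition above) =====
theorem primaganjil_spec : Claim_equal_primaganjil := by
  unfold Claim_equal_primaganjil Spec_primaganjil
  intro a _
  unfold primaganjil primaganjil_alt
  rw [pvFoldA]
  simp only [List.nil_append]
  refine Prod.ext ?_ ?_ <;> simp only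
  · refine List.filter_congr ?_
    intro i hi
    rw [PySem.List.mem_pyRange_iff_of_pos (by norm_num)] at hi
    by_cases h1 : i = 1
    · simp [h1]
    · rw [pvScan_eq i hi.1 hi.2.2 h1, Bool.not_not]
  · refine List.filter_congr ?_
    intro i hi
    rw [PySem.List.mem_pyRange_iff_of_pos (by norm_num)] at hi
    by_cases h1 : i = 1
    · simp [h1]
    · rw [pvScan_eq i hi.1 hi.2.2 h1]
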